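-- pv_equiv track=rewrite | github.com/pypi-data/pypi-mirror-402 | packages/TexTOM/textom-0.7.15-py3-none-any.whl/textom/src/model/symmetries.py | get_proper_point_group
-- ===== SOURCE A (Python) =====
-- def get_proper_point_group(space_group_number):
--     """
--     Determine the proper point group from the space group IT number, accounting for equivalent symmetries.
--
--     Parameters:
--         space_group_number (int): The IT number of the space group.
--
--     Returns:
--         str: The proper point group symbol, or "Unknown" for invalid inputs.
--     """
--     # consider also:
--     # from orix.quaternion.symmetry import get_point_group
--
--     # Define ranges of space groups and their proper point groups (reduced symmetry)
--     proper_point_groups = {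
--         "Triclinic": {range(1, 3): "1"},  # Space groups 1-2
--         "Monoclinic": {range(3, 16): "2"},  # Space groups 3-15
--         "Orthorhombic": {range(16, 75): "222"},  # Space groups 16-74
--         "Tetragonal": {
--             range(75, 89): "4",  # Space groups 75-88
--             range(89, 143): "422",  # Space groups 89-142
--         },
--         "Trigonal": {
--             range(143, 149): "3",  # Space groups 143-148
--             range(149, 168): "32",  # Space groups 149-167
--         },
--         "Hexagonal": {
--             range(168, 177): "6",  # Space groups 168-176
--             range(177, 195): "622",  # Space groups 177-194
--         },
--         "Cubic": {
--             range(195, 209): "23",  # Space groups 195-206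
--             range(209, 231): "432",  # Space groups 207-230
--         },
--     }
--
--     # Iterate through the dictionary to find the matching range and return the proper point group
--     for system, groups in proper_point_groups.items():
--         for spg_range, proper_pg in groups.items():
--             if space_group_number in spg_range:
--                 return proper_pg
--
--     return "Unknown"  # For invalid space group numbers
-- ===== SOURCE B (Python) =====
-- _BOUNDS = [1, 3, 16, 75, 89, 143, 149, 168, 177, 195, 209, 231]
-- _LABELS = ["1", "2", "222", "4", "422", "3", "32", "6", "622", "23", "432"]
--
--
-- def _bisect_right(a, x):
--     # standard-library bisect.bisect_right, hand-written (A imports nothing)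
--     lo, hi = 0, len(a)
--     while lo < hi:
--         mid = (lo + hi) // 2
--         if x < a[mid]:
--             hi = mid
--         else:
--             lo = mid + 1
--     return lo
--
--
-- def get_proper_point_group(space_group_number):
--     i = _bisect_right(_BOUNDS, space_group_number)
--     if i == 0 or i == len(_BOUNDS):
--         return "Unknown"
--     return _LABELS[i - 1]
-- ===== Notes on version B (the rewrite author's own statement) =====
-- stated objective: idiomatic
-- what changed: Replaced the nested dict of range objects scanned linearly by a flat sorted boundary table queried with a binary search (bisect_right), mapping the bucket index to a parallel label list.
import Mathlib
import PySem

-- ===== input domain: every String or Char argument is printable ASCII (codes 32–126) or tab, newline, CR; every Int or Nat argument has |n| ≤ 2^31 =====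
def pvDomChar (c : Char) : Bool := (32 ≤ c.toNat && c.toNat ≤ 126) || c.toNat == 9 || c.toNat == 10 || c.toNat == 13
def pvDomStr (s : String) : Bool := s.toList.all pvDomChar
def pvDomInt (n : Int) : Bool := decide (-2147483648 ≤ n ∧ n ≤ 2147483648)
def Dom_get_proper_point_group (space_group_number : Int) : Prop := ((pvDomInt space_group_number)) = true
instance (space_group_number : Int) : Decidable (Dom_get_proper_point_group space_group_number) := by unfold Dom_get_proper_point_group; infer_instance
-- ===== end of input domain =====

-- B replaces A's linear scan over a nested dict of range objects by a binary search
-- (bisect_right) over a flat sorted boundary table with a parallel label list (objective: idiomatic).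

-- ===== PORT A =====
-- A's nested dict of ranges, flattened in its iteration order (Python dicts iterate
-- in insertion order; `n in range(a, b)` for an int n is exactly a ≤ n < b).
def pvRanges : List (Int × Int × String) :=
  [(1, 3, "1"), (3, 16, "2"), (16, 75, "222"), (75, 89, "4"), (89, 143, "422"),
   (143, 149, "3"), (149, 168, "32"), (168, 177, "6"), (177, 195, "622"),
   (195, 209, "23"), (209, 231, "432")]

-- the for-loops: return the first range containing n, else fall through to "Unknown"
def pvFind : List (Int × Int × String) → Int → String
  | [], _ => "Unknown"
  | (a, b, s) :: rest, n => if a ≤ n ∧ n < b then s else pvFind rest n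

def get_proper_point_group (space_group_number : Int) : String :=
  pvFind pvRanges space_group_number

-- ===== PORT B =====
def pvBounds : List Int := [1, 3, 16, 75, 89, 143, 149, 168, 177, 195, 209, 231]
def pvLabels : List String := ["1", "2", "222", "4", "422", "3", "32", "6", "622", "23", "432"]

def get_proper_point_group_alt (space_group_number : Int) : String :=
  let i := PySem.List.bisectRight pvBounds space_group_number
  if i = 0 ∨ i = pvBounds.length then "Unknown"
  else pvLabels.getD (i - 1) ""

-- ===== PRECONDITION & SPEC =====
def Spec_get_proper_point_group (space_group_number : Int) (out : String) : Prop := out = get_proper_point_group_alt space_group_number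
instance (space_group_number : Int) (out : String) : Decidable (Spec_get_proper_point_group space_group_number out) := by unfold Spec_get_proper_point_group; infer_instance

-- ===== CLAIM (what is proved, stated in full; the proofs are below) =====
def Claim_equal_get_proper_point_group : Prop := ∀ (space_group_number : Int), Dom_get_proper_point_group space_group_number → Spec_get_proper_point_group space_group_number (get_proper_point_group space_group_number)

-- ===== LEMMAS AND PROOFS =====
lemma br_ge (n : Int) (i : Nat) (hi : i < 12)
    (h : pvBounds[i]'(by simpa [pvBounds] using hi) ≤ n) :
    i + 1 ≤ PySem.List.bisectRight pvBounds n := by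
  by_contra hc
  rw [not_le] at hc
  have := (PySem.List.bisectRight_spec pvBounds n (by decide)).2.2 i
    (by simpa [pvBounds] using hi) (by omega)
  omega

lemma br_le (n : Int) (i : Nat) (hi : i < 12)
    (h : n < pvBounds[i]'(by simpa [pvBounds] using hi)) :
    PySem.List.bisectRight pvBounds n ≤ i := by
  by_contra hc
  rw [not_le] at hc
  have := (PySem.List.bisectRight_spec pvBounds n (by decide)).2.1 i
    (by simpa [pvBounds] using hi) (by omega)
  omega

lemma pg_eq (n : Int) : get_proper_point_group n = get_proper_point_group_alt n := by
  by_cases c0 : n < 1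
  · have hk : PySem.List.bisectRight pvBounds n = 0 :=
      Nat.le_zero.mp (br_le n 0 (by norm_num) (by simp [pvBounds]; omega))
    have halt : get_proper_point_group_alt n = "Unknown" := by
      unfold get_proper_point_group_alt
      rw [hk]
      decide
    rw [halt]
    simp only [get_proper_point_group, pvRanges, pvFind]
    rw [if_neg (by omega), if_neg (by omega), if_neg (by omega), if_neg (by omega), if_neg (by omega), if_neg (by omega), if_neg (by omega), if_neg (by omega), if_neg (by omega), if_neg (by omega), if_neg (by omega)]
  by_cases c1 : n < 3
  · have hk : PySem.List.bisectRight pvBounds n = 1 := by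
      have a := br_ge n 0 (by norm_num) (by simp [pvBounds]; omega)
      have b := br_le n 1 (by norm_num) (by simp [pvBounds]; omega)
      omega
    have halt : get_proper_point_group_alt n = "1" := by
      unfold get_proper_point_group_alt
      rw [hk]
      decide
    rw [halt]
    simp only [get_proper_point_group, pvRanges, pvFind]
    rw [if_pos (by omega)]
  by_cases c2 : n < 16
  · have hk : PySem.List.bisectRight pvBounds n = 2 := by
      have a := br_ge n 1 (by norm_num) (by simp [pvBounds]; omega)
      have b := br_le n 2 (by norm_num) (by simp [pvBounds]; omega)
      omega
    have halt : get_proper_point_group_alt n = "2" := by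
      unfold get_proper_point_group_alt
      rw [hk]
      decide
    rw [halt]
    simp only [get_proper_point_group, pvRanges, pvFind]
    rw [if_neg (by omega), if_pos (by omega)]
  by_cases c3 : n < 75
  · have hk : PySem.List.bisectRight pvBounds n = 3 := by
      have a := br_ge n 2 (by norm_num) (by simp [pvBounds]; omega)
      have b := br_le n 3 (by norm_num) (by simp [pvBounds]; omega)
      omega
    have halt : get_proper_point_group_alt n = "222" := by
      unfold get_proper_point_group_alt
      rw [hk]
      decide
    rw [halt]
    simp only [get_proper_point_group, pvRanges, pvFind]
    rw [if_neg (by omega), if_neg (by omega), if_pos (by omega)]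
  by_cases c4 : n < 89
  · have hk : PySem.List.bisectRight pvBounds n = 4 := by
      have a := br_ge n 3 (by norm_num) (by simp [pvBounds]; omega)
      have b := br_le n 4 (by norm_num) (by simp [pvBounds]; omega)
      omega
    have halt : get_proper_point_group_alt n = "4" := by
      unfold get_proper_point_group_alt
      rw [hk]
      decide
    rw [halt]
    simp only [get_proper_point_group, pvRanges, pvFind]
    rw [if_neg (by omega), if_neg (by omega), if_neg (by omega), if_pos (by omega)]
  by_cases c5 : n < 143
  · have hk : PySem.List.bisectRight pvBounds n = 5 := by
      have a := br_ge n 4 (by norm_num) (by simp [pvBounds]; omega)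
      have b := br_le n 5 (by norm_num) (by simp [pvBounds]; omega)
      omega
    have halt : get_proper_point_group_alt n = "422" := by
      unfold get_proper_point_group_alt
      rw [hk]
      decide
    rw [halt]
    simp only [get_proper_point_group, pvRanges, pvFind]
    rw [if_neg (by omega), if_neg (by omega), if_neg (by omega), if_neg (by omega), if_pos (by omega)]
  by_cases c6 : n < 149
  · have hk : PySem.List.bisectRight pvBounds n = 6 := by
      have a := br_ge n 5 (by norm_num) (by simp [pvBounds]; omega)
      have b := br_le n 6 (by norm_num) (by simp [pvBounds]; omega)
      omega
    have halt : get_proper_point_group_alt n = "3" := by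
      unfold get_proper_point_group_alt
      rw [hk]
      decide
    rw [halt]
    simp only [get_proper_point_group, pvRanges, pvFind]
    rw [if_neg (by omega), if_neg (by omega), if_neg (by omega), if_neg (by omega), if_neg (by omega), if_pos (by omega)]
  by_cases c7 : n < 168
  · have hk : PySem.List.bisectRight pvBounds n = 7 := by
      have a := br_ge n 6 (by norm_num) (by simp [pvBounds]; omega)
      have b := br_le n 7 (by norm_num) (by simp [pvBounds]; omega)
      omega
    have halt : get_proper_point_group_alt n = "32" := by
      unfold get_proper_point_group_alt
      rw [hk]
      decide
    rw [halt]
    simp only [get_proper_point_group, pvRanges, pvFind]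
    rw [if_neg (by omega), if_neg (by omega), if_neg (by omega), if_neg (by omega), if_neg (by omega), if_neg (by omega), if_pos (by omega)]
  by_cases c8 : n < 177
  · have hk : PySem.List.bisectRight pvBounds n = 8 := by
      have a := br_ge n 7 (by norm_num) (by simp [pvBounds]; omega)
      have b := br_le n 8 (by norm_num) (by simp [pvBounds]; omega)
      omega
    have halt : get_proper_point_group_alt n = "6" := by
      unfold get_proper_point_group_alt
      rw [hk]
      decide
    rw [halt]
    simp only [get_proper_point_group, pvRanges, pvFind]
    rw [if_neg (by omega), if_neg (by omega), if_neg (by omega), if_neg (by omega), if_neg (by omega), if_neg (by omega), if_neg (by omega), if_pos (by omega)]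
  by_cases c9 : n < 195
  · have hk : PySem.List.bisectRight pvBounds n = 9 := by
      have a := br_ge n 8 (by norm_num) (by simp [pvBounds]; omega)
      have b := br_le n 9 (by norm_num) (by simp [pvBounds]; omega)
      omega
    have halt : get_proper_point_group_alt n = "622" := by
      unfold get_proper_point_group_alt
      rw [hk]
      decide
    rw [halt]
    simp only [get_proper_point_group, pvRanges, pvFind]
    rw [if_neg (by omega), if_neg (by omega), if_neg (by omega), if_neg (by omega), if_neg (by omega), if_neg (by omega), if_neg (by omega), if_neg (by omega), if_pos (by omega)]
  by_cases c10 : n < 209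
  · have hk : PySem.List.bisectRight pvBounds n = 10 := by
      have a := br_ge n 9 (by norm_num) (by simp [pvBounds]; omega)
      have b := br_le n 10 (by norm_num) (by simp [pvBounds]; omega)
      omega
    have halt : get_proper_point_group_alt n = "23" := by
      unfold get_proper_point_group_alt
      rw [hk]
      decide
    rw [halt]
    simp only [get_proper_point_group, pvRanges, pvFind]
    rw [if_neg (by omega), if_neg (by omega), if_neg (by omega), if_neg (by omega), if_neg (by omega), if_neg (by omega), if_neg (by omega), if_neg (by omega), if_neg (by omega), if_pos (by omega)]
  by_cases c11 : n < 231
  · have hk : PySem.List.bisectRight pvBounds n = 11 := by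
      have a := br_ge n 10 (by norm_num) (by simp [pvBounds]; omega)
      have b := br_le n 11 (by norm_num) (by simp [pvBounds]; omega)
      omega
    have halt : get_proper_point_group_alt n = "432" := by
      unfold get_proper_point_group_alt
      rw [hk]
      decide
    rw [halt]
    simp only [get_proper_point_group, pvRanges, pvFind]
    rw [if_neg (by omega), if_neg (by omega), if_neg (by omega), if_neg (by omega), if_neg (by omega), if_neg (by omega), if_neg (by omega), if_neg (by omega), if_neg (by omega), if_neg (by omega), if_pos (by omega)]
  -- remaining case: 231 ≤ n
  have hub := (PySem.List.bisectRight_spec pvBounds n (by decide)).1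
  have hk : PySem.List.bisectRight pvBounds n = 12 := by
    have a := br_ge n 11 (by norm_num) (by simp [pvBounds]; omega)
    have hub2 : PySem.List.bisectRight pvBounds n ≤ 12 := hub
    omega
  have halt : get_proper_point_group_alt n = "Unknown" := by
    unfold get_proper_point_group_alt
    rw [hk]
    decide
  rw [halt]
  simp only [get_proper_point_group, pvRanges, pvFind]
  rw [if_neg (by omega), if_neg (by omega), if_neg (by omega), if_neg (by omega), if_neg (by omega), if_neg (by omega), if_neg (by omega), if_neg (by omega), if_neg (by omega), if_neg (by omega), if_neg (by omega)]

-- ===== VERDICT (by name: the statement is the Claim_ definition above) =====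
theorem get_proper_point_group_spec : Claim_equal_get_proper_point_group := by
  intro n _
  exact pg_eq n
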